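-- pv_equiv track=rewrite | github.com/kubeckaj/JKCS2.1 | TOOLS/SCRIPTS/JKtbml2pkl.py | find_next_occurrence
-- ===== SOURCE A (Python) =====
-- def find_next_occurrence(arr, target):
--   result = []
--   n = len(arr)
--
--   for i in range(n):
--     found = False
--     for j in range(i + 1, n):
--       if arr[j] == target:
--         result.append(j)
--         found = True
--         break
--     if not found:
--       result.append(-1)
--
--   return result
-- ===== SOURCE B (Python) =====
-- def find_next_occurrence(arr, target):
--   out = []
--   nxt = -1
--   for i in range(len(arr) - 1, -1, -1):
--     out.append(nxt)
--     if arr[i] == target: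
--       nxt = i
--   out.reverse()
--   return out
-- ===== Notes on version B (the rewrite author's own statement) =====
-- stated objective: faster
-- what changed: Replaced the per-index forward rescan with a single right-to-left pass that tracks the most recently seen index of target.
import Mathlib
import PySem

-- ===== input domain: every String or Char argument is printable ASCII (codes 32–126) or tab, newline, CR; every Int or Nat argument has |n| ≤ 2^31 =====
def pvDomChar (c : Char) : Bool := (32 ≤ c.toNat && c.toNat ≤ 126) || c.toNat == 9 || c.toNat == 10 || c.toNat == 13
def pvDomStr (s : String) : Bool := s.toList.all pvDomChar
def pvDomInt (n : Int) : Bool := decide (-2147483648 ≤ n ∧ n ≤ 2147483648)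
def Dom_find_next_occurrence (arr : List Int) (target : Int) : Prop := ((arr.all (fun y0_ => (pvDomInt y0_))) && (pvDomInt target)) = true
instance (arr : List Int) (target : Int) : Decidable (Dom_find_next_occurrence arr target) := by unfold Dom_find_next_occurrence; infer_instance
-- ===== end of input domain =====

-- B replaces A's per-index forward rescan by one right-to-left pass tracking the last seen index of target (objective: faster).


-- ===== PORT A =====
-- inner loop: 'for j in range(i+1, n): if arr[j] == target: … break' — first j in js with arr[j] == target
def aInner (arr : List Int) (target : Int) : List Nat → Option Nat
  | [] => none
  | j :: rest => if arr.getD j 0 = target then some j else aInner arr target rest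

def find_next_occurrence (arr : List Int) (target : Int) : List Int :=
  let n := arr.length
  (List.range n).foldl (fun result i =>
    match aInner arr target (List.range' (i + 1) (n - (i + 1))) with
    | some j => result ++ [(j : Int)]
    | none => result ++ [-1]) []

-- ===== PORT B =====
-- one right-to-left pass: append the pending next-occurrence index, then update it at matches; reverse at the end
def find_next_occurrence_alt (arr : List Int) (target : Int) : List Int :=
  let st := (List.range arr.length).reverse.foldl
    (fun (st : Int × List Int) i =>
      (if arr.getD i 0 = target then (i : Int) else st.1, st.2 ++ [st.1]))
    (-1, [])
  st.2.reverse

-- ===== PRECONDITION & SPEC =====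
def Spec_find_next_occurrence (arr : List Int) (target : Int) (out : List Int) : Prop := out = find_next_occurrence_alt arr target
instance (arr : List Int) (target : Int) (out : List Int) : Decidable (Spec_find_next_occurrence arr target out) := by unfold Spec_find_next_occurrence; infer_instance

-- ===== CLAIM (what is proved, stated in full; the proofs are below) =====
def Claim_equal_find_next_occurrence : Prop := ∀ (arr : List Int) (target : Int), Dom_find_next_occurrence arr target → Spec_find_next_occurrence arr target (find_next_occurrence arr target)

-- ===== LEMMAS AND PROOFS =====

-- value of A's inner scan starting at index k (as the Int A appends)
def nA (arr : List Int) (target : Int) (k : Nat) : Int :=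
  match aInner arr target (List.range' k (arr.length - k)) with
  | some j => (j : Int)
  | none => -1

lemma nA_step (arr : List Int) (target : Int) (k : Nat) (hk : k < arr.length) :
    nA arr target k = if arr.getD k 0 = target then (k : Int) else nA arr target (k + 1) := by
  have h : arr.length - k = (arr.length - (k + 1)) + 1 := by omega
  rw [nA, h, List.range'_succ, aInner]
  split_ifs with h1 <;> simp [nA]

lemma nA_len (arr : List Int) (target : Int) : nA arr target arr.length = -1 := by
  simp [nA, aInner]

lemma a_eq_map (arr : List Int) (target : Int) :
    find_next_occurrence arr target
      = (List.range arr.length).map (fun i => nA arr target (i + 1)) := by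
  have hbody : (fun (result : List Int) (i : Nat) =>
      match aInner arr target (List.range' (i + 1) (arr.length - (i + 1))) with
      | some j => result ++ [(j : Int)]
      | none => result ++ [-1])
      = fun result i => result ++ [nA arr target (i + 1)] := by
    funext result i
    rw [nA]
    cases aInner arr target (List.range' (i + 1) (arr.length - (i + 1))) <;> rfl
  rw [find_next_occurrence]
  rw [hbody]
  simpa using PySem.List.foldl_append_singleton_eq_map (fun i => nA arr target (i + 1)) (List.range arr.length) []

lemma b_inv (arr : List Int) (target : Int) :
    ∀ (m : Nat), m ≤ arr.length → ∀ (acc : List Int),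
      (List.range m).reverse.foldl
        (fun (st : Int × List Int) i =>
          (if arr.getD i 0 = target then (i : Int) else st.1, st.2 ++ [st.1]))
        (nA arr target m, acc)
      = (nA arr target 0,
         acc ++ ((List.range m).map (fun i => nA arr target (i + 1))).reverse) := by
  intro m
  induction m with
  | zero => intro _ acc; simp
  | succ m ih =>
    intro hm acc
    rw [List.range_succ]
    simp only [List.reverse_append, List.reverse_singleton, List.singleton_append,
      List.foldl_cons]
    have hstep : (if arr.getD m 0 = target then (m : Int) else nA arr target (m + 1))
        = nA arr target m := (nA_step arr target m (by omega)).symm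
    rw [hstep, ih (by omega)]
    simp

theorem find_next_occurrence_eq (arr : List Int) (target : Int) :
    find_next_occurrence arr target = find_next_occurrence_alt arr target := by
  rw [a_eq_map, find_next_occurrence_alt]
  have h := b_inv arr target arr.length (le_refl _) []
  rw [nA_len] at h
  simp only [h, List.nil_append, List.reverse_reverse]

-- ===== VERDICT (by name: the statement is the Claim_ definition above) =====
theorem find_next_occurrence_spec : Claim_equal_find_next_occurrence := by
  intro arr target _
  exact find_next_occurrence_eq arr target
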